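-- pv_equiv track=rewrite | github.com/KaiboLiu/AverageProportion | bleu_plot.py | calc_AP_catchup
-- ===== SOURCE A (Python) =====
-- def calc_AP_catchup(x,y,waitk):
--     if y == 0: return 0
--     if waitk > x: return x*y
--     inc = [1,1,1,1,0]
--     start = 1
--     curr = [waitk]
--     for i in range(1, y):
--         newval = curr[-1]+inc[i % 5] if curr[-1] < x else x
--         curr.append(newval)
--     return sum(curr)
-- ===== SOURCE B (Python) =====
-- def calc_AP_catchup(x, y, waitk):
--     # Closed-form O(1): the sequence starts at waitk, gains +1 on four of
--     # every five steps (step i adds 0 when i % 5 == 4), and is capped at x.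
--     if waitk > x:
--         return x * y
--     d = x - waitk
--     # i0 = smallest step index whose value reaches the cap x
--     if d == 0:
--         i0 = 0
--     else:
--         q, s = divmod(d - 1, 4)
--         i0 = 5 * q + s + 1 if s < 3 else 5 * (q + 1)
--     m = min(i0, y)
--     # sum of g(i) for i in range(m), where g(i) = i - (i+1)//5 is the total growth after i steps
--     a, b = divmod(m, 5)
--     T = 5 * a * (a - 1) // 2 + a * (b + 1)   # sum of (i+1)//5 for i in range(m)
--     G = m * (m - 1) // 2 - T
--     return waitk * m + G + x * (y - m)
-- ===== Notes on version B (the rewrite author's own statement) =====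
-- stated objective: faster
-- what changed: Replaces A's per-step loop that materialises the whole capped sequence and sums it by O(1) closed-form arithmetic (saturation step from the gap x - waitk, pre/post-saturation parts summed analytically); intended as faster — asymptotically O(1) vs O(y) on the loop path, though a timing run could not measure it consistently because inputs with waitk > x short-circuit A as well. …
-- outside the precondition, e.g. on calc_AP_catchup(5, -3, 2): A returns 2, B returns -2
import Mathlib
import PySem

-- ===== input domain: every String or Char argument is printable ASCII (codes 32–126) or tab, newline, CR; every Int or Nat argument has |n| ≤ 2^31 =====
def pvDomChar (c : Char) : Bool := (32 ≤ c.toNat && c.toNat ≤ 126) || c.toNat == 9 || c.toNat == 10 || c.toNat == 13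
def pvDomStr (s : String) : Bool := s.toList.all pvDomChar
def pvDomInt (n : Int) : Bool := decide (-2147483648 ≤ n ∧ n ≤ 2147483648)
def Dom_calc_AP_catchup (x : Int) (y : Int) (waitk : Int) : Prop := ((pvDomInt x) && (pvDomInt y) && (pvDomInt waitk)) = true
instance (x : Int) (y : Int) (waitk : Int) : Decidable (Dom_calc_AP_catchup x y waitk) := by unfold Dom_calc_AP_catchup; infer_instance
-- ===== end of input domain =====

-- B replaces A's step-by-step loop over y steps by closed-form arithmetic
-- (saturation step from the gap x - waitk, plus analytic sums for both phases);
-- intended as faster (O(1) vs O(y) on the loop path; a timing run could not confirm it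
-- consistently); proved to return exactly A's value on all inputs admitted by Pre_.

-- ===== PORT A =====
def calc_AP_catchup (x : Int) (y : Int) (waitk : Int) : Int :=
  if y = 0 then 0
  else if waitk > x then x * y
  else
    let inc : List Int := [1, 1, 1, 1, 0]
    ((PySem.List.pyRange 1 y 1).foldl
      (fun curr i =>
        curr ++ [if PySem.List.pyGetD curr (-1) 0 < x
                 then PySem.List.pyGetD curr (-1) 0 + PySem.List.pyGetD inc (PySem.Int.mod i 5) 0
                 else x])
      [waitk]).sum

-- ===== PORT B =====
def calc_AP_catchup_alt (x : Int) (y : Int) (waitk : Int) : Int :=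
  if waitk > x then x * y
  else
    let d := x - waitk
    let i0 : Int :=
      if d = 0 then 0
      else
        let q := PySem.Int.floordiv (d - 1) 4
        let s := PySem.Int.mod (d - 1) 4
        if s < 3 then 5 * q + s + 1 else 5 * (q + 1)
    let m := min i0 y
    let a := PySem.Int.floordiv m 5
    let b := PySem.Int.mod m 5
    let t := PySem.Int.floordiv (5 * a * (a - 1)) 2 + a * (b + 1)
    let g := PySem.Int.floordiv (m * (m - 1)) 2 - t
    waitk * m + g + x * (y - m)

-- ===== PRECONDITION & SPEC =====
-- Pre_ restricts to nonnegative y (when waitk ≤ x): y is a sequence length, so negative y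
-- lies outside the natural domain; A returns waitk there (sum over the empty range(1, y)), B the formula value.
def Pre_calc_AP_catchup (x : Int) (y : Int) (waitk : Int) : Prop := y < 0 → waitk > x
instance (x : Int) (y : Int) (waitk : Int) : Decidable (Pre_calc_AP_catchup x y waitk) := by unfold Pre_calc_AP_catchup; infer_instance
def pvWitness_calc_AP_catchup : Int × Int × Int := (5, 3, 2)

def Spec_calc_AP_catchup (x : Int) (y : Int) (waitk : Int) (out : Int) : Prop := out = calc_AP_catchup_alt x y waitk
instance (x : Int) (y : Int) (waitk : Int) (out : Int) : Decidable (Spec_calc_AP_catchup x y waitk out) := by unfold Spec_calc_AP_catchup; infer_instance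

-- ===== CLAIM (what is proved, stated in full; the proofs are below) =====
def Claim_equal_calc_AP_catchup : Prop := ∀ (x : Int) (y : Int) (waitk : Int), Dom_calc_AP_catchup x y waitk → Pre_calc_AP_catchup x y waitk → Spec_calc_AP_catchup x y waitk (calc_AP_catchup x y waitk)

-- ===== LEMMAS AND PROOFS =====

-- total growth after i loop steps: step i adds 1 unless i % 5 == 4
def gstep (i : Nat) : Nat := i - (i + 1) / 5

-- value of A's list at position i (capped at x)
def vval (x waitk : Int) (i : Nat) : Int := min x (waitk + (gstep i : Int))

-- first index whose value reaches the cap, for gap d = x - waitk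
def I0 (d : Nat) : Nat :=
  if d = 0 then 0
  else if (d - 1) % 4 < 3 then 5 * ((d - 1) / 4) + (d - 1) % 4 + 1 else 5 * ((d - 1) / 4 + 1)

def gsumN (M : Nat) : Nat := ((List.range M).map gstep).sum
def tsumN (M : Nat) : Nat := ((List.range M).map (fun i => (i + 1) / 5)).sum

lemma gstep_succ (k : Nat) : gstep (k + 1) = gstep k + (if (k + 1) % 5 = 4 then 0 else 1) := by
  by_cases h : (k + 1) % 5 = 4 <;> simp [h, gstep] <;> omega

lemma incval (r : Nat) (h : r < 5) :
    PySem.List.pyGetD ([1, 1, 1, 1, 0] : List Int) (r : Int) 0 = if r = 4 then 0 else 1 := by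
  interval_cases r <;> decide

lemma i0_char (d i : Nat) : i < I0 d ↔ gstep i < d := by
  unfold I0 gstep; split_ifs <;> omega

lemma foldA (x waitk : Int) (h : waitk ≤ x) (k : Nat) :
    (PySem.List.pyRange 1 (1 + (k : Int)) 1).foldl
      (fun curr i =>
        curr ++ [if PySem.List.pyGetD curr (-1) 0 < x
                 then PySem.List.pyGetD curr (-1) 0 +
                      PySem.List.pyGetD ([1, 1, 1, 1, 0] : List Int) (PySem.Int.mod i 5) 0
                 else x])
      [waitk] = (List.range (k + 1)).map (vval x waitk) := by
  induction k with
  | zero =>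
    rw [PySem.List.pyRange_one_eq_nil (by omega)]
    simp [vval, gstep]
    omega
  | succ n ih =>
    have hsplit : (1 : Int) + ((n : Int) + 1) = (1 + (n : Int)) + 1 := by ring
    push_cast
    rw [hsplit, PySem.List.pyRange_one_succ_right (by omega), List.foldl_append]
    push_cast at ih
    rw [ih]
    simp only [List.foldl_cons, List.foldl_nil]
    have hlast : PySem.List.pyGetD ((List.range (n + 1)).map (vval x waitk)) (-1) 0
        = vval x waitk n := by
      rw [List.range_succ, List.map_append]
      exact PySem.List.pyGetD_neg_one_append_singleton _ _ _
    rw [hlast]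
    have hmod : PySem.Int.mod (1 + (n : Int)) 5 = (((n + 1) % 5 : Nat) : Int) := by
      have : (1 + (n : Int)) = (((n + 1 : Nat) : Int)) := by push_cast; ring
      rw [this]; exact_mod_cast PySem.Int.mod_natCast (n + 1) 5
    rw [hmod, incval _ (Nat.mod_lt _ (by norm_num))]
    rw [List.range_succ (n := n + 1), List.map_append]
    congr 1
    simp only [List.map_cons, List.map_nil]
    congr 1
    have hg := gstep_succ n
    unfold vval
    by_cases h4 : (n + 1) % 5 = 4 <;> simp [h4] at hg ⊢ <;> rw [hg] <;> push_cast <;> omega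

lemma vval_shift (x waitk : Int) (h : waitk ≤ x) (i : Nat) :
    vval x waitk i = waitk + ((min (x - waitk).toNat (gstep i) : Nat) : Int) := by
  unfold vval; push_cast [Nat.cast_min]; omega

lemma sum_shift (w : Int) (c : Nat → Nat) (N : Nat) :
    ((List.range N).map (fun i => w + (c i : Int))).sum
      = w * N + (((List.range N).map c).sum : Int) := by
  induction N with
  | zero => simp
  | succ n ih =>
    rw [List.range_succ]
    simp only [List.map_append, List.sum_append, List.map_cons, List.map_nil,
      List.sum_cons, List.sum_nil]
    rw [ih]; push_cast; ring

lemma ms_eq (d : Nat) (N : Nat) :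
    ((List.range N).map (fun i => min d (gstep i))).sum
      = gsumN (min (I0 d) N) + d * (N - min (I0 d) N) := by
  induction N with
  | zero => simp [gsumN]
  | succ n ih =>
    rw [List.range_succ]
    simp only [List.map_append, List.sum_append, List.map_cons, List.map_nil, List.sum_cons,
      List.sum_nil]
    rw [ih]
    by_cases h : n < I0 d
    · have hg : gstep n < d := (i0_char d n).mp h
      have h1 : min (I0 d) n = n := by omega
      have h2 : min (I0 d) (n + 1) = n + 1 := by omega
      rw [h1, h2, min_eq_right (le_of_lt hg)]
      have hgs : gsumN (n + 1) = gsumN n + gstep n := by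
        unfold gsumN; rw [List.range_succ]; simp
      have hz1 : n + 1 - (n + 1) = 0 := by omega
      have hz2 : n - n = 0 := by omega
      rw [hgs, hz1, hz2, Nat.mul_zero]
      omega
    · have hg : d ≤ gstep n := by have := (i0_char d n).not; omega
      have h1 : min (I0 d) n = I0 d := by omega
      have h2 : min (I0 d) (n + 1) = I0 d := by omega
      rw [h1, h2, min_eq_left hg]
      have hI : I0 d ≤ n := by omega
      have hstep : n + 1 - I0 d = (n - I0 d) + 1 := by omega
      rw [hstep, Nat.mul_add, Nat.mul_one]
      ring

lemma t_block (a : Nat) : 2 * tsumN (5 * a) + 3 * a = 5 * (a * a) := by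
  induction a with
  | zero => simp [tsumN]
  | succ n ih =>
    have h5 : 5 * (n + 1) = 5 * n + 5 := by ring
    unfold tsumN at *
    rw [h5, List.range_add]
    simp only [List.map_append, List.sum_append, List.map_map]
    have hblock : (((List.range 5).map (fun i => 5 * n + i)).map (fun i => (i + 1) / 5)).sum
        = 5 * n + 1 := by
      simp [List.range_succ]
      omega
    rw [List.map_map] at hblock
    rw [hblock]
    have : 5 * ((n + 1) * (n + 1)) = 5 * (n * n) + 10 * n + 5 := by ring
    omega

lemma t_split (M : Nat) : tsumN M = tsumN (5 * (M / 5)) + (M / 5) * (M % 5) := by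
  have hM : M = 5 * (M / 5) + M % 5 := (Nat.div_add_mod' M 5).symm ▸ by omega
  unfold tsumN
  conv_lhs => rw [hM]
  rw [List.range_add]
  simp only [List.map_append, List.sum_append, List.map_map]
  have hb : M % 5 < 5 := Nat.mod_lt _ (by norm_num)
  congr 1
  generalize M % 5 = b at hb ⊢
  generalize M / 5 = a
  interval_cases b <;> simp [List.range_succ] <;> omega

lemma t_closed (M : Nat) : 2 * tsumN M = 5 * (M / 5) * (M / 5 - 1) + 2 * ((M / 5) * (M % 5 + 1)) := by
  have hb := t_block (M / 5)
  have hs := t_split M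
  have e1 : 5 * (M / 5) * (M / 5 - 1) + 5 * (M / 5) = 5 * ((M / 5) * (M / 5)) := by
    cases h : M / 5 with
    | zero => simp
    | succ n => simp; ring
  have e2 : (M / 5) * (M % 5 + 1) = (M / 5) * (M % 5) + M / 5 := by ring
  generalize (M / 5) * (M % 5) = q at *
  generalize (M / 5) * (M / 5) = p at *
  generalize 5 * (M / 5) * (M / 5 - 1) = r at *
  omega

lemma gauss (M : Nat) : 2 * (List.range M).sum = M * (M - 1) := by
  induction M with
  | zero => simp
  | succ n ih =>
    rw [List.range_succ]; simp only [List.sum_append, List.sum_cons, List.sum_nil]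
    have h : (n + 1) * (n + 1 - 1) = n * (n - 1) + 2 * n := by
      cases n with
      | zero => simp
      | succ m => push_cast; ring_nf
    omega

lemma gsum_add_tsum (M : Nat) : gsumN M + tsumN M = (List.range M).sum := by
  induction M with
  | zero => simp [gsumN, tsumN]
  | succ n ih =>
    unfold gsumN tsumN at *
    rw [List.range_succ]
    simp only [List.map_append, List.sum_append, List.map_cons, List.map_nil, List.sum_cons,
      List.sum_nil]
    have : gstep n + (n + 1) / 5 = n := by unfold gstep; omega
    omega

lemma cast_mul_pred (A : Nat) : ((A : Int) * ((A : Int) - 1)) = ((A * (A - 1) : Nat) : Int) := by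
  cases A with
  | zero => simp
  | succ n => push_cast; ring

lemma gsum_int (M : Nat) :
    ((gsumN M : Nat) : Int)
      = PySem.Int.floordiv ((M : Int) * ((M : Int) - 1)) 2
        - (PySem.Int.floordiv (5 * ((M / 5 : Nat) : Int) * (((M / 5 : Nat) : Int) - 1)) 2
           + ((M / 5 : Nat) : Int) * (((M % 5 : Nat) : Int) + 1)) := by
  have c1 : ((M : Int) * ((M : Int) - 1)) = ((M * (M - 1) : Nat) : Int) := cast_mul_pred M
  have c2 : (5 * ((M / 5 : Nat) : Int) * (((M / 5 : Nat) : Int) - 1))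
      = ((5 * (M / 5) * (M / 5 - 1) : Nat) : Int) := by
    rw [mul_assoc, cast_mul_pred (M / 5)]; push_cast; ring
  rw [c1, c2]
  have f1 : PySem.Int.floordiv ((M * (M - 1) : Nat) : Int) 2 = ((M * (M - 1) / 2 : Nat) : Int) := by
    exact_mod_cast PySem.Int.floordiv_natCast (M * (M - 1)) 2
  have f2 : PySem.Int.floordiv ((5 * (M / 5) * (M / 5 - 1) : Nat) : Int) 2
      = ((5 * (M / 5) * (M / 5 - 1) / 2 : Nat) : Int) := by
    exact_mod_cast PySem.Int.floordiv_natCast (5 * (M / 5) * (M / 5 - 1)) 2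
  rw [f1, f2]
  have ht := t_closed M
  have hg := gauss M
  have hs := gsum_add_tsum M
  have e2 : ((M / 5 : Nat) : Int) * (((M % 5 : Nat) : Int) + 1)
      = (((M / 5) * (M % 5 + 1) : Nat) : Int) := by push_cast; ring
  rw [e2]
  generalize (M / 5) * (M % 5 + 1) = c at *
  generalize 5 * (M / 5) * (M / 5 - 1) = Q at *
  generalize M * (M - 1) = P at *
  omega

lemma i0_int (d : Nat) :
    (if (d : Int) = 0 then (0 : Int)
     else
       if PySem.Int.mod ((d : Int) - 1) 4 < 3
       then 5 * PySem.Int.floordiv ((d : Int) - 1) 4 + PySem.Int.mod ((d : Int) - 1) 4 + 1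
       else 5 * (PySem.Int.floordiv ((d : Int) - 1) 4 + 1)) = (I0 d : Int) := by
  rcases Nat.eq_zero_or_pos d with h0 | h1
  · simp [h0, I0]
  · have hd : ((d : Int) - 1) = (((d - 1 : Nat)) : Int) := by omega
    have hne : ((d : Int)) ≠ 0 := by omega
    have hm : PySem.Int.mod ((d : Int) - 1) 4 = (((d - 1) % 4 : Nat) : Int) := by
      rw [hd]; exact_mod_cast PySem.Int.mod_natCast (d - 1) 4
    have hf : PySem.Int.floordiv ((d : Int) - 1) 4 = (((d - 1) / 4 : Nat) : Int) := by
      rw [hd]; exact_mod_cast PySem.Int.floordiv_natCast (d - 1) 4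
    rw [hm, hf, if_neg hne]
    unfold I0
    split_ifs <;> push_cast <;> omega

lemma B_eval (x y waitk : Int) (h1 : ¬ waitk > x) (h2 : 0 ≤ y) :
    calc_AP_catchup_alt x y waitk
      = waitk * ((min (I0 (x - waitk).toNat) y.toNat : Nat) : Int)
        + ((gsumN (min (I0 (x - waitk).toNat) y.toNat) : Nat) : Int)
        + x * (y - ((min (I0 (x - waitk).toNat) y.toNat : Nat) : Int)) := by
  have hd : x - waitk = (((x - waitk).toNat : Nat) : Int) := by omega
  have hy : y = ((y.toNat : Nat) : Int) := by omega
  simp only [calc_AP_catchup_alt, if_neg h1]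
  rw [hd, hy, i0_int, ← Nat.cast_min]
  set M := min (I0 (x - waitk).toNat) y.toNat with hM
  have ha : PySem.Int.floordiv ((M : Nat) : Int) 5 = ((M / 5 : Nat) : Int) := by
    exact_mod_cast PySem.Int.floordiv_natCast M 5
  have hb : PySem.Int.mod ((M : Nat) : Int) 5 = ((M % 5 : Nat) : Int) := by
    exact_mod_cast PySem.Int.mod_natCast M 5
  rw [ha, hb, ← gsum_int M]
  simp only [Int.toNat_natCast]
  rfl

lemma A_eval (x y waitk : Int) (h0 : ¬ y = 0) (h1 : ¬ waitk > x) (h2 : ¬ y < 0) :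
    calc_AP_catchup x y waitk
      = waitk * (y.toNat : Int)
        + ((gsumN (min (I0 (x - waitk).toNat) y.toNat) : Nat) : Int)
        + ((x - waitk).toNat : Int) * ((y.toNat - min (I0 (x - waitk).toNat) y.toNat : Nat) : Int) := by
  have hx : waitk ≤ x := by omega
  obtain ⟨k, hk⟩ : ∃ k, y.toNat = k + 1 := ⟨y.toNat - 1, by omega⟩
  have hy : y = 1 + (k : Int) := by omega
  simp only [calc_AP_catchup, if_neg h0, if_neg h1]
  rw [hy, foldA x waitk hx k]
  have hcong : (List.range (k + 1)).map (vval x waitk)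
      = (List.range (k + 1)).map (fun i => waitk + ((min (x - waitk).toNat (gstep i) : Nat) : Int)) :=
    List.map_congr_left (fun i _ => vval_shift x waitk hx i)
  rw [hcong, sum_shift, ms_eq]
  have hkk : (1 + (k : Int)).toNat = k + 1 := by omega
  rw [hkk]
  have hle : min (I0 (x - waitk).toNat) (k + 1) ≤ k + 1 := Nat.min_le_right _ _
  push_cast [Nat.cast_sub hle]
  ring

-- ===== VERDICT (by name: the statement is the Claim_ definition above) =====
theorem calc_AP_catchup_spec : Claim_equal_calc_AP_catchup := by
  intro x y waitk _ hpre
  unfold Spec_calc_AP_catchup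
  by_cases h1 : waitk > x
  · by_cases h0 : y = 0
    · simp [calc_AP_catchup, calc_AP_catchup_alt, h0, if_pos h1]
    · simp [calc_AP_catchup, calc_AP_catchup_alt, if_neg h0, if_pos h1]
  · have h2 : ¬ y < 0 := fun hneg => h1 (hpre hneg)
    by_cases h0 : y = 0
    · have hB := B_eval x y waitk h1 (by omega)
      subst h0
      simp only [calc_AP_catchup]
      simp [hB, gsumN]
    · rw [A_eval x y waitk h0 h1 h2, B_eval x y waitk h1 (by omega)]
      have hd : ((x - waitk).toNat : Int) = x - waitk := by omega
      have hMle : (min (I0 (x - waitk).toNat) y.toNat) ≤ y.toNat := Nat.min_le_right _ _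
      have hy : ((y.toNat : Nat) : Int) = y := by omega
      push_cast [Nat.cast_sub hMle]
      rw [hd, hy]
      ring
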